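-- pv_equiv track=rewrite | github.com/IShamraI/python--ests-example | export_docstrings.py | extract_description_and_steps
-- ===== SOURCE A (Python) =====
-- def extract_description_and_steps(docstring):
--     description = ""
--     steps_with_expected_results = []
--     lines = docstring.strip().split('\n')
--     current_step = None
--
--     for line in lines:
--         if line.strip().endswith("Step:"):
--             if current_step is not None:
--                 steps_with_expected_results.append(current_step)
--             current_step = {"step": line.strip()[:-6], "expected_result": ""}
--         elif current_step is not None:
--             current_step["expected_result"] += line.strip() + ' '
--
--     if current_step is not None:
--         steps_with_expected_results.append(current_step)
--
--     return description, steps_with_expected_results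
-- ===== SOURCE B (Python) =====
-- def extract_description_and_steps(docstring):
--     lines = [l.strip() for l in docstring.strip().split('\n')]
--     n = len(lines)
--     i = 0
--     while i < n and not lines[i].endswith("Step:"):
--         i += 1
--     steps = []
--     while i < n:
--         name = lines[i][:-6]
--         i += 1
--         parts = []
--         while i < n and not lines[i].endswith("Step:"):
--             parts.append(lines[i] + ' ')
--             i += 1
--         steps.append({"step": name, "expected_result": ''.join(parts)})
--     return "", steps
-- ===== Notes on version B (the rewrite author's own statement) =====
-- stated objective: alternative
-- what changed: A's single fold with an Optional current-step accumulator is replaced by a two-pointer scan over pre-stripped lines: skip to the first header, then for each header advance a cursor over its body lines and emit the step directly.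
import Mathlib
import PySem

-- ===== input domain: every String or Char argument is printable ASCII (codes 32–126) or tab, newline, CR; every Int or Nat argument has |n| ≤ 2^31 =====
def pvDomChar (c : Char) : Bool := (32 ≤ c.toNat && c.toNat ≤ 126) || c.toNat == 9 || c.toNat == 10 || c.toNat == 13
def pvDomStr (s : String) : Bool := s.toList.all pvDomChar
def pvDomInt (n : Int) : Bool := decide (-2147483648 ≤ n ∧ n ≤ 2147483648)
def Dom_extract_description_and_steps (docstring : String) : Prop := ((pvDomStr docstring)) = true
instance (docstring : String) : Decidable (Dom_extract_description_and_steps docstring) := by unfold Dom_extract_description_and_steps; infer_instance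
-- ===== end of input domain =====

-- B replaces A's single fold carrying an Optional current-step with a two-pointer scan
-- (skip to first header, then per header collect its body); objective: alternative.
-- The two-key dict {"step": …, "expected_result": …} is represented while looping by its
-- ordered pair of values and materialised as the 2-entry assoc list at the end.

-- ===== PORT A =====
-- A's post-loop 'if current_step is not None: steps.append(current_step)'
def pvFinish (fin : Option (List Char × List Char) × List (List Char × List Char)) :
    List (List Char × List Char) :=
  match fin.1 with
  | some cur => fin.2 ++ [cur]
  | none => fin.2
-- one iteration of A's for-loop: state = (current_step?, steps_with_expected_results)
def pvAStep (st : Option (List Char × List Char) × List (List Char × List Char))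
    (line : List Char) : Option (List Char × List Char) × List (List Char × List Char) :=
  let s := PySem.Chars.strip line
  if PySem.Chars.endswith s ("Step:".toList) then
    match st.1 with
    | some cur => (some (PySem.List.slice s none (some (-6)), ([] : List Char)), st.2 ++ [cur])
    | none => (some (PySem.List.slice s none (some (-6)), ([] : List Char)), st.2)
  else
    match st.1 with
    | some cur => (some (cur.1, cur.2 ++ s ++ [' ']), st.2)
    | none => (none, st.2)

-- the pair back as the insertion-ordered dict
def pvToDict (p : List Char × List Char) : List (String × String) :=
  [("step", String.ofList p.1), ("expected_result", String.ofList p.2)]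

def extract_description_and_steps (docstring : String) : String × (List (List (String × String))) :=
  let lines := PySem.Chars.splitOn (PySem.Chars.strip docstring.toList) ['\n']
  ("", (pvFinish (lines.foldl pvAStep (none, []))).map pvToDict)

-- ===== PORT B =====
-- first while-loop: advance i past non-header lines; here the cursor is the remaining suffix
def pvBSkip (ls : List (List Char)) : List (List Char) :=
  match ls with
  | [] => []
  | l :: rest => if PySem.Chars.endswith l ("Step:".toList) then l :: rest else pvBSkip rest

-- inner while-loop: collect 'line + " "' parts until the next header; returns (joined body, rest)
def pvBBody (ls : List (List Char)) : List Char × List (List Char) :=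
  match ls with
  | [] => ([], [])
  | l :: rest =>
    if PySem.Chars.endswith l ("Step:".toList) then ([], l :: rest)
    else
      let (b, r) := pvBBody rest
      (l ++ [' '] ++ b, r)

theorem pvBBody_length_le (ls : List (List Char)) : (pvBBody ls).2.length ≤ ls.length := by
  induction ls with
  | nil => simp [pvBBody]
  | cons l rest ih =>
    simp only [pvBBody]
    split
    · simp
    · simpa using Nat.le_succ_of_le ih

-- outer while-loop: each iteration consumes one header line and its body
def pvBSteps (ls : List (List Char)) : List (List Char × List Char) :=
  match ls with
  | [] => []
  | l :: rest =>
    let name := PySem.List.slice l none (some (-6))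
    let br := pvBBody rest
    (name, br.1) :: pvBSteps br.2
termination_by ls.length
decreasing_by
  simpa using Nat.lt_succ_of_le (pvBBody_length_le rest)

def extract_description_and_steps_alt (docstring : String) : String × (List (List (String × String))) :=
  let lines := (PySem.Chars.splitOn (PySem.Chars.strip docstring.toList) ['\n']).map PySem.Chars.strip
  ("", (pvBSteps (pvBSkip lines)).map pvToDict)

-- ===== PRECONDITION & SPEC =====
def Spec_extract_description_and_steps (docstring : String) (out : String × (List (List (String × String)))) : Prop := out = extract_description_and_steps_alt docstring
instance (docstring : String) (out : String × (List (List (String × String)))) : Decidable (Spec_extract_description_and_steps docstring out) := by unfold Spec_extract_description_and_steps; infer_instance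

-- ===== CLAIM (what is proved, stated in full; the proofs are below) =====
def Claim_equal_extract_description_and_steps : Prop := ∀ (docstring : String), Dom_extract_description_and_steps docstring → Spec_extract_description_and_steps docstring (extract_description_and_steps docstring)

-- ===== LEMMAS AND PROOFS =====

-- A's step on an already-stripped line (the fold over lines.map strip after foldl_map)
def pvAStep' (st : Option (List Char × List Char) × List (List Char × List Char))
    (s : List Char) : Option (List Char × List Char) × List (List Char × List Char) :=
  if PySem.Chars.endswith s ("Step:".toList) then
    match st.1 with
    | some cur => (some (PySem.List.slice s none (some (-6)), ([] : List Char)), st.2 ++ [cur])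
    | none => (some (PySem.List.slice s none (some (-6)), ([] : List Char)), st.2)
  else
    match st.1 with
    | some cur => (some (cur.1, cur.2 ++ s ++ [' ']), st.2)
    | none => (none, st.2)

theorem pvLoop_some (ls : List (List Char)) (name body : List Char)
    (acc : List (List Char × List Char)) :
    pvFinish (ls.foldl pvAStep' (some (name, body), acc)) =
      acc ++ (name, body ++ (pvBBody ls).1) :: pvBSteps (pvBBody ls).2 := by
  induction ls generalizing name body acc with
  | nil => simp [pvFinish, pvBBody, pvBSteps]
  | cons l rest ih =>
    by_cases h : PySem.Chars.endswith l ("Step:".toList) = true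
    · simp only [List.foldl_cons, pvAStep', if_pos h, pvBBody]
      rw [ih, pvBSteps]
      simp
    · simp only [List.foldl_cons, pvAStep', if_neg h, pvBBody]
      rw [ih]
      simp [List.append_assoc]

theorem pvLoop_none (ls : List (List Char)) (acc : List (List Char × List Char)) :
    pvFinish (ls.foldl pvAStep' (none, acc)) = acc ++ pvBSteps (pvBSkip ls) := by
  induction ls generalizing acc with
  | nil => simp [pvFinish, pvBSkip, pvBSteps]
  | cons l rest ih =>
    by_cases h : PySem.Chars.endswith l ("Step:".toList) = true
    · simp only [List.foldl_cons, pvAStep', if_pos h]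
      rw [pvLoop_some, pvBSkip, if_pos h, pvBSteps]
      simp
    · simp only [List.foldl_cons, pvAStep', if_neg h]
      rw [ih, pvBSkip, if_neg h]

-- ===== VERDICT (by name: the statement is the Claim_ definition above) =====
theorem extract_description_and_steps_spec : Claim_equal_extract_description_and_steps := by
  intro docstring _
  unfold Spec_extract_description_and_steps extract_description_and_steps
    extract_description_and_steps_alt
  have hfun : pvAStep = fun st s => pvAStep' st (PySem.Chars.strip s) := rfl
  simp only [hfun]
  rw [← List.foldl_map (f := PySem.Chars.strip) (g := pvAStep'), pvLoop_none, List.nil_append]
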